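-- pv_equiv track=rewrite | github.com/RickCYD/Deck_synergy | src/simulation/mana_simulator.py | can_pay_cost_with_sources
-- ===== SOURCE A (Python) =====
-- from typing import Dict, List, Optional, Tuple, Set, Iterable
--
-- COLORS: Tuple[str, ...] = ("W", "U", "B", "R", "G", "C")
--
-- def can_pay_cost_with_sources(cost: Dict[str, int], sources: List[Set[str]]) -> bool:
--     """Check if a mana cost is payable given a list of sources.
--
--     - Each source can be used at most once.
--     - A source with multiple colors can satisfy exactly one colored pip.
--     - After satisfying colored pips, remaining sources can pay generic.
--     - Colorless requirement 'C' consumes sources that can produce 'C' or any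
--       other mana (treating generic similarly), but if a spell explicitly
--       requires 'C', we try to allocate 'C'-capable sources first.
--     """
--     # Clone inputs to avoid mutation
--     remaining_sources = list(sources)
--
--     # Build list of colored requirements (excluding generic)
--     color_reqs: List[str] = []
--     for c in COLORS:
--         if c == "C":
--             continue  # Handle explicit colorless later
--         color_reqs.extend([c] * int(cost.get(c, 0) or 0))
--
--     # Greedy assignment: satisfy the most constrained colors first.
--     # Sort by the number of sources that can produce that color (ascending).
--     color_reqs.sort(key=lambda col: sum(1 for s in remaining_sources if col in s))
--
--     used_indices: Set[int] = set()
--     for color in color_reqs: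
--         idx = _pick_source_for_color(color, remaining_sources, used_indices)
--         if idx is None:
--             return False
--         used_indices.add(idx)
--
--     # Handle explicit colorless 'C' (if any): try to allocate from sources that include 'C' first,
--     # then from any remaining source if necessary (many effects allow generic mana to pay C,
--     # but if strict 'C' is required, this is conservative; Scryfall 'C' is rare in costs).
--     explicit_c = int(cost.get("C", 0) or 0)
--     for _ in range(explicit_c):
--         idx = _pick_source_for_color("C", remaining_sources, used_indices, prefer_exact=True)
--         if idx is None:
--             # Fall back to any unused source
--             idx = _pick_any_unused_source(remaining_sources, used_indices)
--         if idx is None: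
--             return False
--         used_indices.add(idx)
--
--     # Now check generic
--     total_sources = len(remaining_sources)
--     remaining_available = total_sources - len(used_indices)
--     return remaining_available >= int(cost.get("generic", 0) or 0)
--
-- def _pick_source_for_color(
--     color: str,
--     sources: List[Set[str]],
--     used_indices: Set[int],
--     prefer_exact: bool = False,
-- ) -> Optional[int]:
--     """Pick an unused source index that can produce a given color.
--
--     - If prefer_exact is True, prefer sources that explicitly include the color
--       over flexible ones.
--     - Break ties by choosing the least-flexible source (fewest colors) first.
--     """
--     candidates: List[Tuple[int, Set[str]]] = [
--         (i, s) for i, s in enumerate(sources) if i not in used_indices and (color in s or color == "C")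
--     ]
--     if not candidates:
--         return None
--
--     if prefer_exact and color != "C":
--         exact = [(i, s) for i, s in candidates if color in s]
--         if exact:
--             candidates = exact
--
--     # Choose the least flexible (fewest colors) to preserve flexible ones
--     candidates.sort(key=lambda t: len(t[1]))
--     return candidates[0][0]
--
-- def _pick_any_unused_source(sources: List[Set[str]], used_indices: Set[int]) -> Optional[int]:
--     for i in range(len(sources)):
--         if i not in used_indices:
--             return i
--     return None
-- ===== SOURCE B (Python) =====
-- def can_pay_cost_with_sources(cost, sources):
--     """Greedy payability check: pre-sort source indices by flexibility once,
--     then satisfy each colored pip by a linear scan of that order; explicit 'C'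
--     and generic are settled by pure counting (any unused source can pay them)."""
--     n = len(sources)
--     order = sorted(range(n), key=lambda i: len(sources[i]))  # stable: (len, index)
--     counts = {c: sum(1 for s in sources if c in s) for c in ("W", "U", "B", "R", "G")}
--     reqs = [c for c in ("W", "U", "B", "R", "G") for _ in range(max(cost.get(c, 0) or 0, 0))]
--     reqs.sort(key=counts.__getitem__)
--     used = [False] * n
--     used_n = 0
--     for color in reqs:
--         for i in order:
--             if not used[i] and color in sources[i]:
--                 used[i] = True
--                 used_n += 1
--                 break
--         else:
--             return False
--     c_need = max(cost.get("C", 0) or 0, 0)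
--     avail = n - used_n
--     if avail < c_need:
--         return False
--     return avail - c_need >= (cost.get("generic", 0) or 0)
-- ===== Notes on version B (the rewrite author's own statement) =====
-- stated objective: alternative
-- what changed: B pre-sorts the source indices by flexibility once and satisfies each colored pip by a linear scan of that order, and replaces A's per-pip candidate-list rebuild+sort and its explicit-'C' picking loop by pure counting arithmetic (any unused source can pay C/generic).
import Mathlib
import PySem

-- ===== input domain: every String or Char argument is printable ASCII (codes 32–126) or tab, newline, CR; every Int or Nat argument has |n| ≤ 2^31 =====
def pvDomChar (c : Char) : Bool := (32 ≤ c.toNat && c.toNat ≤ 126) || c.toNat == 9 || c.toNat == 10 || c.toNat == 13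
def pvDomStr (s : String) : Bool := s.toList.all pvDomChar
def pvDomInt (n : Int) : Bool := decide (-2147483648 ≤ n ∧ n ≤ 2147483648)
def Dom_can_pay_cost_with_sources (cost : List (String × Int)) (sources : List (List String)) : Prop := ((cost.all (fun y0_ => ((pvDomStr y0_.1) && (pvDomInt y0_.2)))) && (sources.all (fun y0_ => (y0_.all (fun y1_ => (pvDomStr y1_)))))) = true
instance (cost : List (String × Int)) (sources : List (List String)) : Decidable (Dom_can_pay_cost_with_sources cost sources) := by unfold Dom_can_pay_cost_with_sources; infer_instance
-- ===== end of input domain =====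

-- B replaces A's per-pip candidate rebuild + sort by one pre-sorted index order scanned
-- linearly, and replaces A's explicit-'C' picking loop by counting arithmetic (objective: alternative).

-- ===== PORT A =====
def pvCOLORS : List String := ["W", "U", "B", "R", "G", "C"]

-- sum(1 for s in remaining_sources if col in s)
def pvColorCount (sources : List (List String)) (col : String) : Int :=
  sources.foldl (fun acc s => if s.contains col then acc + 1 else acc) 0

-- _pick_source_for_color
def pvPickSourceForColor (color : String) (sources : List (List String))
    (used : PySem.Set Int) (preferExact : Bool) : Option Int :=
  let candidates : List (Int × List String) :=
    (PySem.List.enumerate sources).filter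
      (fun p => !(PySem.Set.contains used p.1) && (p.2.contains color || color == "C"))
  if candidates = [] then none
  else
    let candidates :=
      if preferExact && color != "C" then
        let exact := candidates.filter (fun p => p.2.contains color)
        if exact = [] then candidates else exact
      else candidates
    match PySem.List.sorted candidates (fun t => t.2.length) with
    | [] => none
    | p :: _ => some p.1

-- _pick_any_unused_source
def pvPickAnyUnused (sources : List (List String)) (used : PySem.Set Int) : Option Int :=
  (PySem.List.pyRange 0 sources.length).find? (fun i => !(PySem.Set.contains used i))

-- 'for color in color_reqs: …'
def pvColorFold : List String → List (List String) → PySem.Set Int → Option (PySem.Set Int)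
  | [], _, used => some used
  | c :: rest, src, used =>
    match pvPickSourceForColor c src used false with
    | none => none
    | some i => pvColorFold rest src (PySem.Set.add used i)

-- 'for _ in range(explicit_c): …'
def pvCFold : Nat → List (List String) → PySem.Set Int → Option (PySem.Set Int)
  | 0, _, used => some used
  | k + 1, src, used =>
    match (match pvPickSourceForColor "C" src used true with
           | some i => some i
           | none => pvPickAnyUnused src used) with
    | none => none
    | some i => pvCFold k src (PySem.Set.add used i)

def can_pay_cost_with_sources (cost : List (String × Int)) (sources : List (List String)) : Bool :=
  let d := PySem.Dict.mk cost
  -- int(cost.get(c, 0) or 0) is just the stored int; [c] * v is replicate v.toNat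
  let colorReqs : List String :=
    pvCOLORS.foldl
      (fun acc c => if c == "C" then acc else acc ++ List.replicate (PySem.Dict.getD d c 0).toNat c) []
  let colorReqs := PySem.List.sorted colorReqs (fun col => pvColorCount sources col)
  match pvColorFold colorReqs sources PySem.Set.empty with
  | none => false
  | some used =>
    match pvCFold (PySem.Dict.getD d "C" 0).toNat sources used with
    | none => false
    | some used =>
      decide ((sources.length : Int) - (used.length : Int) ≥ PySem.Dict.getD d "generic" 0)

-- ===== PORT B =====
-- 'for color in reqs: for i in order: … break / else: return False'
def pvAltColorLoop : List String → List Int → List (List String) → List Bool → Int → Option Int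
  | [], _, _, _, un => some un
  | c :: rest, order, src, used, un =>
    match order.find? (fun i => !(PySem.List.pyGetD used i false) && (PySem.List.pyGetD src i []).contains c) with
    | none => none
    | some i => pvAltColorLoop rest order src (PySem.List.pySetD used i true) (un + 1)

def can_pay_cost_with_sources_alt (cost : List (String × Int)) (sources : List (List String)) : Bool :=
  let d := PySem.Dict.mk cost
  let n := sources.length
  -- order = sorted(range(n), key=lambda i: len(sources[i]))
  let order : List Int := PySem.List.sorted (PySem.List.pyRange 0 n)
      (fun i => (PySem.List.pyGetD sources i []).length)
  -- counts = {c: sum(1 for s in sources if c in s) for c in ("W","U","B","R","G")}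
  let counts : PySem.Dict String Int :=
    (["W", "U", "B", "R", "G"]).foldl
      (fun dd c => dd.insert c (sources.foldl (fun acc s => if s.contains c then acc + 1 else acc) 0))
      PySem.Dict.empty
  -- reqs built then sorted by counts[c]
  let reqs : List String :=
    (["W", "U", "B", "R", "G"]).flatMap (fun c => List.replicate (max (PySem.Dict.getD d c 0) 0).toNat c)
  let reqs := PySem.List.sorted reqs (fun c => PySem.Dict.getD counts c 0)
  match pvAltColorLoop reqs order sources (List.replicate n false) 0 with
  | none => false
  | some un =>
    let cNeed : Int := max (PySem.Dict.getD d "C" 0) 0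
    let avail : Int := (n : Int) - un
    if avail < cNeed then false
    else decide (avail - cNeed ≥ PySem.Dict.getD d "generic" 0)

-- ===== PRECONDITION & SPEC =====
def Spec_can_pay_cost_with_sources (cost : List (String × Int)) (sources : List (List String)) (out : Bool) : Prop := out = can_pay_cost_with_sources_alt cost sources
instance (cost : List (String × Int)) (sources : List (List String)) (out : Bool) : Decidable (Spec_can_pay_cost_with_sources cost sources out) := by unfold Spec_can_pay_cost_with_sources; infer_instance

-- ===== CLAIM (what is proved, stated in full; the proofs are below) =====
def Claim_equal_can_pay_cost_with_sources : Prop := ∀ (cost : List (String × Int)) (sources : List (List String)), Dom_can_pay_cost_with_sources cost sources → Spec_can_pay_cost_with_sources cost sources (can_pay_cost_with_sources cost sources)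

-- ===== LEMMAS AND PROOFS =====

def pvFmStep {α κ : Type} [LinearOrder κ] (key : α → κ) : Option α → α → Option α
  | none, x => some x
  | some m, x => if key x < key m then some x else some m

def pvScan {α κ : Type} [LinearOrder κ] (key : α → κ) (P : α → Bool) (l : List α) : Option α :=
  l.foldl (fun acc x => if P x then pvFmStep key acc x else acc) none

theorem pvFind?_insertBy {α κ : Type} [LinearOrder κ] (key : α → κ) (P : α → Bool) (x : α)
    (ys : List α) (hs : ys.Pairwise (fun a b => key a ≤ key b)) :
    (PySem.List.insertBy (fun a b => decide (key a < key b)) x ys).find? P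
      = if P x then pvFmStep key (ys.find? P) x else ys.find? P := by
  induction ys with
  | nil =>
    cases hPx : P x <;> simp [PySem.List.insertBy, hPx, pvFmStep]
  | cons y t ih =>
    have hyt : ∀ b ∈ t, key y ≤ key b := (List.pairwise_cons.mp hs).1
    have ht : t.Pairwise (fun a b => key a ≤ key b) := (List.pairwise_cons.mp hs).2
    simp only [PySem.List.insertBy]
    by_cases hxy : key x < key y
    · simp only [hxy, decide_true, if_true]
      by_cases hPx : P x = true
      · rw [List.find?_cons_of_pos hPx]
        cases hfy : List.find? P (y :: t) with
        | none => simp [hPx, pvFmStep]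
        | some m =>
          have hm : m ∈ y :: t := List.mem_of_find?_eq_some hfy
          have hlt : key x < key m := by
            rcases List.mem_cons.mp hm with rfl | hmt
            · exact hxy
            · exact lt_of_lt_of_le hxy (hyt m hmt)
          simp [hPx, pvFmStep, hlt]
      · simp only [Bool.not_eq_true] at hPx
        rw [List.find?_cons_of_neg (by simp [hPx])]
        simp [hPx]
    · simp only [hxy, decide_false, Bool.false_eq_true, if_false]
      cases hPy : P y with
      | true =>
        by_cases hPx : P x = true
        · simp [List.find?_cons_of_pos hPy, hPx, pvFmStep, hxy]
        · simp only [Bool.not_eq_true] at hPx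
          simp [List.find?_cons_of_pos hPy, hPx]
      | false =>
        rw [List.find?_cons_of_neg (by simp [hPy]), ih ht,
          List.find?_cons_of_neg (by simp [hPy])]

theorem pvSorted_find?_eq_pvScan {α κ : Type} [LinearOrder κ] (l : List α) (key : α → κ) (P : α → Bool) :
    (PySem.List.sorted l key).find? P = pvScan key P l := by
  induction l using List.reverseRecOn with
  | nil => simp [PySem.List.sorted_eq_foldl_insertBy, pvScan]
  | append_singleton l x ih =>
    have h1 : PySem.List.sorted (l ++ [x]) key
        = PySem.List.insertBy (fun a b => decide (key a < key b)) x (PySem.List.sorted l key) := by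
      rw [PySem.List.sorted_eq_foldl_insertBy, PySem.List.sorted_eq_foldl_insertBy,
        List.foldl_append]
      rfl
    rw [h1, pvFind?_insertBy key P x _ (PySem.List.sorted_pairwise l key), ih]
    unfold pvScan
    rw [List.foldl_append]
    rfl


theorem pvScanMapAux {α β κ : Type} [LinearOrder κ] (f : α → β) (key : β → κ) (P : β → Bool)
    (l : List α) (acc : Option α) :
    List.foldl (fun acc a => if P (f a) then pvFmStep key acc (f a) else acc) (Option.map f acc) l
      = Option.map f (List.foldl (fun acc a => if P (f a) then pvFmStep (fun a => key (f a)) acc a else acc) acc l) := by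
  induction l generalizing acc with
  | nil => rfl
  | cons a t ih =>
    simp only [List.foldl_cons]
    rw [← ih]
    congr 1
    by_cases hP : P (f a) = true
    · simp only [hP, if_true]
      cases acc with
      | none => rfl
      | some m =>
        simp only [Option.map_some, pvFmStep]
        split <;> rfl
    · simp [hP]

theorem pvScan_map {α β κ : Type} [LinearOrder κ] (f : α → β) (key : β → κ) (P : β → Bool) (l : List α) :
    pvScan key P (l.map f) = Option.map f (pvScan (fun a => key (f a)) (fun a => P (f a)) l) := by
  unfold pvScan
  rw [List.foldl_map]
  exact pvScanMapAux f key P l none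

theorem pvScan_congr {α κ : Type} [LinearOrder κ] (key : α → κ) (P Q : α → Bool) (l : List α)
    (h : ∀ x ∈ l, P x = Q x) : pvScan key P l = pvScan key Q l := by
  unfold pvScan
  exact PySem.List.foldl_congr_mem l _ _ none (fun acc x hx => by rw [h x hx])

theorem pvScanSomeAux {α κ : Type} [LinearOrder κ] (key : α → κ) (P : α → Bool) :
    ∀ (l : List α) (acc : Option α) (x : α),
    List.foldl (fun acc x => if P x then pvFmStep key acc x else acc) acc l = some x →
      acc = some x ∨ (x ∈ l ∧ P x = true) := by
  intro l
  induction l with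
  | nil => intro acc x h; exact Or.inl h
  | cons a t ih =>
    intro acc x h
    simp only [List.foldl_cons] at h
    rcases ih _ x h with h1 | h1
    · by_cases hP : P a = true
      · simp only [hP, if_true] at h1
        cases acc with
        | none =>
          simp only [pvFmStep] at h1
          cases Option.some.inj h1
          exact Or.inr ⟨List.mem_cons_self, hP⟩
        | some m =>
          simp only [pvFmStep] at h1
          split at h1
          · cases h1; exact Or.inr ⟨List.mem_cons_self, hP⟩
          · exact Or.inl h1
      · simp only [if_neg hP] at h1
        exact Or.inl h1
    · exact Or.inr ⟨List.mem_cons_of_mem a h1.1, h1.2⟩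

theorem pvScan_eq_some {α κ : Type} [LinearOrder κ] {key : α → κ} {P : α → Bool} {l : List α} {x : α}
    (h : pvScan key P l = some x) : x ∈ l ∧ P x = true := by
  rcases pvScanSomeAux key P l none x h with h1 | h1
  · cases h1
  · exact h1

theorem pvScanNoneAux {α κ : Type} [LinearOrder κ] (key : α → κ) (P : α → Bool) :
    ∀ (l : List α) (m : α),
    List.foldl (fun acc x => if P x then pvFmStep key acc x else acc) (some m) l ≠ none := by
  intro l
  induction l with
  | nil => intro m h; cases h
  | cons a t ih =>
    intro m h
    simp only [List.foldl_cons] at h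
    by_cases hP : P a = true
    · simp only [hP, if_true, pvFmStep] at h
      split at h <;> exact ih _ h
    · simp only [if_neg (by simp [hP] : ¬ P a = true)] at h
      exact ih _ h

theorem pvScan_eq_none_iff {α κ : Type} [LinearOrder κ] (key : α → κ) (P : α → Bool) (l : List α) :
    pvScan key P l = none ↔ ∀ x ∈ l, P x = false := by
  unfold pvScan
  induction l with
  | nil => simp
  | cons a t ih =>
    simp only [List.foldl_cons]
    constructor
    · intro h
      by_cases hP : P a = true
      · exfalso
        simp only [hP, if_true, pvFmStep] at h
        exact pvScanNoneAux key P t a h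
      · intro x hx
        rcases List.mem_cons.mp hx with rfl | hxt
        · simpa using hP
        · simp only [if_neg (by simp [hP] : ¬ P a = true)] at h
          exact ih.mp h x hxt
    · intro h
      have hPa : P a = false := h a List.mem_cons_self
      simp only [hPa, Bool.false_eq_true, if_false]
      exact ih.mpr (fun x hx => h x (List.mem_cons_of_mem a hx))

-- the shared normal form of both programs' per-pip pick, over Nat indices
def pvIdxScan (sources : List (List String)) (Q : Nat → Bool) : Option Nat :=
  pvScan (fun j => (sources.getD j []).length) Q (List.range sources.length)

theorem pvScan_top {α κ : Type} [LinearOrder κ] (key : α → κ) (l : List α) :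
    pvScan key (fun _ => true) l = l.foldl (pvFmStep key) none := by
  unfold pvScan
  exact PySem.List.foldl_congr_mem l _ _ none (fun acc x hx => by simp)

theorem pvHeadPick (cands : List (Int × List String)) :
    (if cands = [] then (none : Option Int)
     else match PySem.List.sorted cands (fun t => t.2.length) with
          | [] => none
          | p :: _ => some p.1)
      = Option.map Prod.fst (pvScan (fun t : Int × List String => t.2.length) (fun _ => true) cands) := by
  by_cases hc : cands = []
  · subst hc; simp [pvScan]
  · rw [if_neg hc, ← pvSorted_find?_eq_pvScan]
    cases hs : PySem.List.sorted cands (fun t => t.2.length) with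
    | nil =>
      have hp := (PySem.List.sorted_perm cands (fun t => t.2.length) false).length_eq
      rw [hs] at hp
      exact absurd (List.eq_nil_of_length_eq_zero hp.symm) hc
    | cons p t => rw [List.find?_cons_of_pos rfl]; rfl

theorem pvPick_eq_idxScan (c : String) (src : List (List String)) (used : PySem.Set Int)
    (pe : Bool) (hpe : pe = false ∨ c = "C") :
    pvPickSourceForColor c src used pe
      = Option.map (fun j : Nat => (j : Int))
          (pvIdxScan src (fun j => !(PySem.Set.contains used (j : Int))
              && ((src.getD j []).contains c || c == "C"))) := by
  have hguard : (pe && c != "C") = false := by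
    rcases hpe with rfl | rfl <;> simp
  unfold pvPickSourceForColor
  simp only [hguard, Bool.false_eq_true, if_false]
  rw [pvHeadPick]
  have henum : PySem.List.enumerate src
      = (List.range src.length).map (fun j : Nat => ((j : Int), src.getD j [])) := by
    rw [PySem.List.enumerate_eq_map_pyRange src []]
    simp only [PySem.List.len_eq, PySem.List.pyRange_zero_natCast, List.map_map]
    exact List.map_congr_left (fun j _ => by simp)
  rw [henum, pvScan_top,
    ← PySem.List.foldl_if_eq_foldl_filter
      (fun p : Int × List String => !(PySem.Set.contains used p.1) && (p.2.contains c || c == "C"))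
      (pvFmStep (fun t : Int × List String => t.2.length)) _ none]
  have hdef : List.foldl
      (fun acc x => if (!(PySem.Set.contains used x.1) && (x.2.contains c || c == "C")) = true
        then pvFmStep (fun t : Int × List String => t.2.length) acc x else acc) none
      ((List.range src.length).map (fun j : Nat => ((j : Int), src.getD j [])))
      = pvScan (fun t : Int × List String => t.2.length)
          (fun p => !(PySem.Set.contains used p.1) && (p.2.contains c || c == "C"))
          ((List.range src.length).map (fun j : Nat => ((j : Int), src.getD j []))) := rfl
  rw [hdef, pvScan_map (fun j : Nat => ((j : Int), src.getD j [])), Option.map_map]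
  rfl

theorem pvAltFind_eq_idxScan (c : String) (src : List (List String)) (used : List Bool) :
    (PySem.List.sorted (PySem.List.pyRange 0 src.length)
        (fun i => (PySem.List.pyGetD src i []).length)).find?
        (fun i => !(PySem.List.pyGetD used i false) && (PySem.List.pyGetD src i []).contains c)
      = Option.map (fun j : Nat => (j : Int))
          (pvIdxScan src (fun j => !(used.getD j false) && (src.getD j []).contains c)) := by
  rw [pvSorted_find?_eq_pvScan, PySem.List.pyRange_zero_natCast, pvScan_map]
  simp only [PySem.List.pyGetD_natCast]
  rfl

-- invariant of A's used-index set
def pvInv (n : Nat) (u : List Int) : Prop :=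
  u.Nodup ∧ ∀ x ∈ u, ∃ j : Nat, j < n ∧ x = (j : Int)

theorem pvExistsUnused_iff {n : Nat} {u : List Int} (h : pvInv n u) :
    (∃ j : Nat, j < n ∧ ¬ ((j : Int) ∈ u)) ↔ u.length < n := by
  obtain ⟨hnd, hmem⟩ := h
  have hRnd : ((List.range n).map (fun j : Nat => (j : Int))).Nodup :=
    (List.nodup_range).map (fun a b hab => by exact_mod_cast hab)
  have hsub : u ⊆ (List.range n).map (fun j : Nat => (j : Int)) := by
    intro x hx
    obtain ⟨j, hj, rfl⟩ := hmem x hx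
    exact List.mem_map.mpr ⟨j, List.mem_range.mpr hj, rfl⟩
  have hsp := List.subperm_of_subset hnd hsub
  have hlen : u.length ≤ n := by simpa using hsp.length_le
  constructor
  · rintro ⟨j, hj, hnot⟩
    rcases lt_or_eq_of_le hlen with hl | hl
    · exact hl
    · exact absurd ((hsp.perm_of_length_le (by simp [hl])).mem_iff.mpr
        (List.mem_map.mpr ⟨j, List.mem_range.mpr hj, rfl⟩)) hnot
  · intro hlt
    by_contra hno
    push Not at hno
    have hRsub : (List.range n).map (fun j : Nat => (j : Int)) ⊆ u := by
      intro x hx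
      obtain ⟨j, hj, rfl⟩ := List.mem_map.mp hx
      exact hno j (List.mem_range.mp hj)
    have := (List.subperm_of_subset hRnd hRsub).length_le
    simp at this
    omega

theorem pvInv_length_le {n : Nat} {u : List Int} (h : pvInv n u) : u.length ≤ n := by
  obtain ⟨hnd, hmem⟩ := h
  have hsub : u ⊆ (List.range n).map (fun j : Nat => (j : Int)) := by
    intro x hx
    obtain ⟨j, hj, rfl⟩ := hmem x hx
    exact List.mem_map.mpr ⟨j, List.mem_range.mpr hj, rfl⟩
  simpa using (List.subperm_of_subset hnd hsub).length_le

theorem pvInv_add {n : Nat} {u : List Int} {j : Nat} (hinv : pvInv n u) (hj : j < n)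
    (hnm : (j : Int) ∉ u) :
    pvInv n (PySem.Set.add u (j : Int)) ∧ (PySem.Set.add u (j : Int)).length = u.length + 1 := by
  have hadd : PySem.Set.add u (j : Int) = u ++ [(j : Int)] := by
    simp [PySem.Set.add, PySem.Set.contains, hnm]
  rw [hadd]
  obtain ⟨hnd, hmem⟩ := hinv
  refine ⟨⟨?_, ?_⟩, by simp⟩
  · simp [List.nodup_append, hnd]
    intro a ha hab
    exact hnm (hab ▸ ha)
  · intro x hx
    rcases List.mem_append.mp hx with hx | hx
    · exact hmem x hx
    · exact ⟨j, hj, (List.mem_singleton.mp hx)⟩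

theorem pvPickC_eq (src : List (List String)) (u : PySem.Set Int) :
    pvPickSourceForColor "C" src u true
      = Option.map (fun j : Nat => (j : Int))
          (pvIdxScan src (fun j => !(PySem.Set.contains u (j : Int)))) := by
  rw [pvPick_eq_idxScan "C" src u true (Or.inr rfl)]
  congr 1
  exact pvScan_congr _ _ _ _ (fun j hj => by simp)

-- A's explicit-C loop only counts
theorem pvCFold_spec (k : Nat) (src : List (List String)) (u : List Int)
    (hinv : pvInv src.length u) :
    (u.length + k ≤ src.length →
        ∃ u', pvCFold k src u = some u' ∧ u'.length = u.length + k)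
      ∧ (src.length < u.length + k → pvCFold k src u = none) := by
  induction k generalizing u with
  | zero =>
    refine ⟨fun _ => ⟨u, rfl, by omega⟩, fun hlt => absurd hlt (by have := pvInv_length_le hinv; omega)⟩
  | succ k ih =>
    by_cases hu : u.length < src.length
    · obtain ⟨j0, hj0, hjn0⟩ := (pvExistsUnused_iff hinv).mpr hu
      cases hscan : pvIdxScan src (fun j => !(PySem.Set.contains u (j : Int))) with
      | none =>
        exfalso
        have hall := (pvScan_eq_none_iff _ _ _).mp hscan
        have := hall j0 (List.mem_range.mpr hj0)
        simp [PySem.Set.contains, hjn0] at this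
      | some j =>
        obtain ⟨hjr, hjp⟩ := pvScan_eq_some hscan
        have hj : j < src.length := List.mem_range.mp hjr
        have hjn : (j : Int) ∉ u := by
          intro hmem
          simp [PySem.Set.contains, hmem] at hjp
        obtain ⟨hinv', hlen'⟩ := pvInv_add hinv hj hjn
        have ih' := ih (PySem.Set.add u (j : Int)) hinv'
        simp only [pvCFold, pvPickC_eq, hscan, Option.map_some]
        constructor
        · intro hle
          obtain ⟨u', hu', hul⟩ := ih'.1 (by omega)
          exact ⟨u', hu', by omega⟩
        · intro hlt
          rw [ih'.2 (by omega)]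
    · have hall : ∀ j : Nat, j < src.length → (j : Int) ∈ u := by
        intro j hj
        by_contra hn
        exact hu ((pvExistsUnused_iff hinv).mp ⟨j, hj, hn⟩)
      have hscan : pvIdxScan src (fun j => !(PySem.Set.contains u (j : Int))) = none := by
        apply (pvScan_eq_none_iff _ _ _).mpr
        intro j hj
        simp [PySem.Set.contains, hall j (List.mem_range.mp hj)]
      have hany : pvPickAnyUnused src u = none := by
        apply List.find?_eq_none.mpr
        intro i hi
        obtain ⟨h0, h1⟩ := (PySem.List.mem_pyRange_one).mp hi
        have hm : i ∈ u := by
          have hcast : ((i.toNat : Nat) : Int) = i := Int.toNat_of_nonneg h0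
          rw [← hcast]
          exact hall i.toNat (by omega)
        simp [PySem.Set.contains, hm]
      simp only [pvCFold, pvPickC_eq, hscan, Option.map_none, hany]
      exact ⟨fun hle => absurd hle (by omega), fun _ => trivial⟩

-- lockstep of the two colored-pip loops
theorem pvLoop_eq (reqs : List String) (hreqs : ∀ c ∈ reqs, c ≠ "C")
    (src : List (List String)) (uA : List Int) (uB : List Bool) (un : Int)
    (hinv : pvInv src.length uA) (hlen : uB.length = src.length)
    (hrel : ∀ j : Nat, j < src.length → uB.getD j false = uA.contains (j : Int))
    (hun : un = (uA.length : Int)) :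
    pvAltColorLoop reqs
        (PySem.List.sorted (PySem.List.pyRange 0 src.length)
          (fun i => (PySem.List.pyGetD src i []).length)) src uB un
      = Option.map (fun u : List Int => (u.length : Int)) (pvColorFold reqs src uA)
      ∧ ∀ u', pvColorFold reqs src uA = some u' → pvInv src.length u' := by
  induction reqs generalizing uA uB un with
  | nil =>
    refine ⟨by simp [pvAltColorLoop, pvColorFold, hun], ?_⟩
    intro u' hu'
    cases hu'
    exact hinv
  | cons c rest ih =>
    have hc : c ≠ "C" := hreqs c List.mem_cons_self
    have hcb : (c == "C") = false := beq_eq_false_iff_ne.mpr hc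
    have hpick := pvPick_eq_idxScan c src uA false (Or.inl rfl)
    have hfind := pvAltFind_eq_idxScan c src uB
    have hQ : pvIdxScan src (fun j => !(PySem.Set.contains uA (j : Int))
          && ((src.getD j []).contains c || c == "C"))
        = pvIdxScan src (fun j => !(uB.getD j false) && (src.getD j []).contains c) := by
      apply pvScan_congr
      intro j hj
      have hj' : j < src.length := List.mem_range.mp hj
      rw [hrel j hj']
      by_cases hm : (j : Int) ∈ uA <;>
        simp [PySem.Set.contains, hm, hcb]
    rw [hQ] at hpick
    cases hscan : pvIdxScan src (fun j => !(uB.getD j false) && (src.getD j []).contains c) with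
    | none =>
      rw [hscan] at hpick hfind
      simp only [Option.map_none] at hpick hfind
      refine ⟨?_, ?_⟩
      · simp only [pvAltColorLoop, hfind, pvColorFold, hpick, Option.map_none]
      · intro u' hu'
        simp only [pvColorFold, hpick] at hu'
        exact absurd hu' (by simp)
    | some j =>
      rw [hscan] at hpick hfind
      simp only [Option.map_some] at hpick hfind
      obtain ⟨hjr, hjp⟩ := pvScan_eq_some hscan
      have hj : j < src.length := List.mem_range.mp hjr
      have hgB : uB.getD j false = false := by
        cases hgb : uB.getD j false
        · rfl
        · rw [hgb] at hjp; simp at hjp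
      have hjn : (j : Int) ∉ uA := by
        intro hm
        have := hrel j hj
        rw [hgB] at this
        simp [hm] at this
      obtain ⟨hinv', hlen'⟩ := pvInv_add hinv hj hjn
      have hadd : PySem.Set.add uA (j : Int) = uA ++ [(j : Int)] := by
        simp [PySem.Set.add, PySem.Set.contains, hjn]
      have hrel' : ∀ j' : Nat, j' < src.length →
          (uB.set j true).getD j' false = List.contains (PySem.Set.add uA (j : Int)) (j' : Int) := by
        intro j' hj'
        rw [hadd]
        by_cases hjj : j' = j
        · subst hjj
          simp [List.getD, hlen ▸ hj']
        · rw [show ((uA ++ [(j : Int)]).contains (j' : Int)) = uA.contains (j' : Int) by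
            by_cases hm : (j' : Int) ∈ uA
            · simp [hm]
            · simp [hm]
              intro he
              exact absurd (by exact_mod_cast he) hjj]
          rw [← hrel j' hj']
          simp [List.getD, Ne.symm hjj]
      have ih' := ih (fun c' hc' => hreqs c' (List.mem_cons_of_mem c hc'))
        (PySem.Set.add uA (j : Int)) (uB.set j true) (un + 1) hinv'
        (by simpa using hlen) hrel' (by omega)
      refine ⟨?_, ?_⟩
      · simp only [pvAltColorLoop, hfind, PySem.List.pySetD_natCast, pvColorFold, hpick]
        exact ih'.1
      · intro u' hu'
        simp only [pvColorFold, hpick] at hu'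
        exact ih'.2 u' hu'

theorem pvMaxToNat (v : Int) : (max v 0).toNat = v.toNat := by omega

theorem pvInsertBy_congr {α : Type} (b1 b2 : α → α → Bool) (x : α) (ys : List α)
    (h : ∀ y ∈ ys, b1 x y = b2 x y) :
    PySem.List.insertBy b1 x ys = PySem.List.insertBy b2 x ys := by
  induction ys with
  | nil => rfl
  | cons y t ih =>
    simp only [PySem.List.insertBy]
    rw [h y List.mem_cons_self]
    split
    · rfl
    · rw [ih (fun y hy => h y (List.mem_cons_of_mem _ hy))]

theorem pvSortedCongrAux {α κ : Type} [LT κ] [DecidableLT κ] (k1 k2 : α → κ) (l : List α)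
    (hl : ∀ x ∈ l, k1 x = k2 x) :
    ∀ acc : List α, (∀ x ∈ acc, k1 x = k2 x) →
      l.foldl (fun acc x => PySem.List.insertBy (fun a b => decide (k1 a < k1 b)) x acc) acc
        = l.foldl (fun acc x => PySem.List.insertBy (fun a b => decide (k2 a < k2 b)) x acc) acc := by
  induction l with
  | nil => intro acc _; rfl
  | cons a t ih =>
    intro acc hacc
    simp only [List.foldl_cons]
    have ha : k1 a = k2 a := hl a List.mem_cons_self
    have hins : PySem.List.insertBy (fun a b => decide (k1 a < k1 b)) a acc
        = PySem.List.insertBy (fun a b => decide (k2 a < k2 b)) a acc := by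
      apply pvInsertBy_congr
      intro y hy
      rw [ha, hacc y hy]
    rw [hins]
    apply ih (fun x hx => hl x (List.mem_cons_of_mem _ hx))
    intro x hx
    rcases (PySem.List.mem_insertBy _ _ _ _).mp hx with rfl | hx
    · exact ha
    · exact hacc x hx

theorem pvSorted_congr {α κ : Type} [LT κ] [DecidableLT κ] (l : List α) (k1 k2 : α → κ)
    (h : ∀ x ∈ l, k1 x = k2 x) :
    PySem.List.sorted l k1 = PySem.List.sorted l k2 := by
  rw [PySem.List.sorted_eq_foldl_insertBy, PySem.List.sorted_eq_foldl_insertBy]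
  exact pvSortedCongrAux k1 k2 l h [] (by simp)

theorem pvReqs_eq (cost : List (String × Int)) (src : List (List String)) :
    PySem.List.sorted
        (pvCOLORS.foldl
          (fun acc c => if c == "C" then acc
            else acc ++ List.replicate (PySem.Dict.getD (PySem.Dict.mk cost) c 0).toNat c) [])
        (fun col => pvColorCount src col)
      = PySem.List.sorted
          ((["W", "U", "B", "R", "G"]).flatMap
            (fun c => List.replicate (max (PySem.Dict.getD (PySem.Dict.mk cost) c 0) 0).toNat c))
          (fun c => PySem.Dict.getD
            ((["W", "U", "B", "R", "G"]).foldl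
              (fun dd c => dd.insert c (src.foldl (fun acc s => if s.contains c then acc + 1 else acc) 0))
              (PySem.Dict.empty : PySem.Dict String Int)) c 0) := by
  have hfold : pvCOLORS.foldl
      (fun acc c => if c == "C" then acc
        else acc ++ List.replicate (PySem.Dict.getD (PySem.Dict.mk cost) c 0).toNat c) []
      = (["W", "U", "B", "R", "G"]).flatMap
          (fun c => List.replicate (max (PySem.Dict.getD (PySem.Dict.mk cost) c 0) 0).toNat c) := by
    simp only [pvCOLORS, List.foldl_cons, List.foldl_nil, List.flatMap_cons, List.flatMap_nil]
    simp [pvMaxToNat]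
  rw [hfold]
  apply pvSorted_congr
  intro x hx
  have hx5 : x = "W" ∨ x = "U" ∨ x = "B" ∨ x = "R" ∨ x = "G" := by
    simp only [List.mem_flatMap, List.mem_cons, List.not_mem_nil, or_false] at hx
    obtain ⟨c, hc, hxc⟩ := hx
    have := List.eq_of_mem_replicate hxc
    subst this
    exact hc
  rcases hx5 with rfl | rfl | rfl | rfl | rfl <;>
    simp [pvColorCount, PySem.Dict.getD_insert]

-- ===== VERDICT (by name: the statement is the Claim_ definition above) =====
theorem pvMain_eq (cost : List (String × Int)) (sources : List (List String)) :
    can_pay_cost_with_sources cost sources = can_pay_cost_with_sources_alt cost sources := by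
  simp only [can_pay_cost_with_sources, can_pay_cost_with_sources_alt]
  rw [pvReqs_eq cost sources]
  have hne : ∀ c ∈ PySem.List.sorted
      ((["W", "U", "B", "R", "G"]).flatMap
        (fun c => List.replicate (max (PySem.Dict.getD (PySem.Dict.mk cost) c 0) 0).toNat c))
      (fun c => PySem.Dict.getD
        ((["W", "U", "B", "R", "G"]).foldl
          (fun dd c => dd.insert c (sources.foldl (fun acc s => if s.contains c then acc + 1 else acc) 0))
          (PySem.Dict.empty : PySem.Dict String Int)) c 0), c ≠ "C" := by
    intro c hc
    have hc' := (PySem.List.mem_sorted _ _ _ _).mp hc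
    simp only [List.mem_flatMap, List.mem_cons, List.not_mem_nil, or_false] at hc'
    obtain ⟨c', hc5, hrep⟩ := hc'
    have := List.eq_of_mem_replicate hrep
    subst this
    rcases hc5 with rfl | rfl | rfl | rfl | rfl <;> decide
  have hl := pvLoop_eq _ hne sources PySem.Set.empty
      (List.replicate sources.length false) 0
      ⟨List.nodup_nil, by simp⟩ (by simp)
      (by intro j hj; simp [List.getD]) (by simp)
  cases hA : pvColorFold _ sources PySem.Set.empty with
  | none =>
    rw [hA] at hl
    simp only [hl.1, Option.map_none]
  | some u =>
    have hinvu := hl.2 u hA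
    have hcfs := pvCFold_spec (PySem.Dict.getD (PySem.Dict.mk cost) "C" 0).toNat sources u hinvu
    by_cases hle : u.length + (PySem.Dict.getD (PySem.Dict.mk cost) "C" 0).toNat ≤ sources.length
    · obtain ⟨u'', hcf, hlen''⟩ := hcfs.1 hle
      simp only [hl.1, hA, Option.map_some, hcf]
      rw [if_neg (by omega)]
      rw [decide_eq_decide]
      omega
    · have hnone := hcfs.2 (by omega)
      simp only [hl.1, hA, Option.map_some, hnone]
      rw [if_pos (by omega)]

theorem can_pay_cost_with_sources_spec : Claim_equal_can_pay_cost_with_sources := by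
  intro cost sources _
  unfold Spec_can_pay_cost_with_sources
  exact pvMain_eq cost sources
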